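-- pv_equiv track=rewrite | github.com/MathieuSm/Post-Msc2 | 03_Scripts/hFE1_Preprocessing.py | GetFilenameAndExtension
-- ===== SOURCE A (Python) =====
-- def GetFilenameAndExtension(FileName):
--     """ Function returns file extension and file name. """
--     Parts = FileName.split('.')
--     NParts = len(Parts)
--     Ext = Parts[NParts - 1]
--     FileName = ''
--     for Part in range(NParts - 1):
--         if Part < NParts - 2:
--             FileName = FileName + Parts[Part] + '.'
--         else:
--             FileName = FileName + Parts[Part]
--
--     return FileName, Ext
-- ===== SOURCE B (Python) =====
-- def GetFilenameAndExtension(FileName):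
--     """ Function returns file extension and file name. """
--     idx = FileName.rfind('.')
--     if idx == -1:
--         return '', FileName
--     return FileName[:idx], FileName[idx + 1:]
-- ===== Notes on version B (the rewrite author's own statement) =====
-- stated objective: idiomatic
-- what changed: B locates the last dot with a single rfind and slices the string around it, instead of tokenizing on every dot and rejoining all but the last token in an index loop.
import Mathlib
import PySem

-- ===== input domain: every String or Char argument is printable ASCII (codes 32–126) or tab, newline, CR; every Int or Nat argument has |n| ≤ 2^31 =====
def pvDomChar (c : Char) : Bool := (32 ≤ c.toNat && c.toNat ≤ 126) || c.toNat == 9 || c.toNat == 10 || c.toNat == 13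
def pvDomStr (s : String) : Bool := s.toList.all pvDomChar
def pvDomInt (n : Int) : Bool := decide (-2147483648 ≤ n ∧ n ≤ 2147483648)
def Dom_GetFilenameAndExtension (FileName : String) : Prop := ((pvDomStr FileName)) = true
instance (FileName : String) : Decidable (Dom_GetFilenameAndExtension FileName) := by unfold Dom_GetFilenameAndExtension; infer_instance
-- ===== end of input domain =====

-- B replaces A's tokenize-on-every-dot-and-rejoin loop by one rfind of the last dot and two slices (idiomatic; same cost).

-- ===== PORT A =====
def GetFilenameAndExtension (FileName : String) : String × String :=
  -- Parts = FileName.split('.')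
  let parts : List (List Char) := PySem.Chars.splitOn FileName.toList ['.']
  -- NParts = len(Parts)
  let nparts : Nat := parts.length
  -- Ext = Parts[NParts - 1]
  let ext : List Char := (PySem.List.pyGet? parts ((nparts : Int) - 1)).getD []
  -- FileName = ''; for Part in range(NParts - 1): …
  let name : List Char :=
    (PySem.List.pyRange 0 ((nparts : Int) - 1) 1).foldl
      (fun acc i =>
        if i < (nparts : Int) - 2 then
          acc ++ (PySem.List.pyGet? parts i).getD [] ++ ['.']
        else
          acc ++ (PySem.List.pyGet? parts i).getD []) []
  (String.ofList name, String.ofList ext)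

-- ===== PORT B =====
def GetFilenameAndExtension_alt (FileName : String) : String × String :=
  let idx : Int := PySem.Str.rfind FileName "."
  if idx = -1 then ("", FileName)
  else (PySem.Str.slice FileName none (some idx), PySem.Str.slice FileName (some (idx + 1)) none)

-- ===== PRECONDITION & SPEC =====
def Spec_GetFilenameAndExtension (FileName : String) (out : String × String) : Prop := out = GetFilenameAndExtension_alt FileName
instance (FileName : String) (out : String × String) : Decidable (Spec_GetFilenameAndExtension FileName out) := by unfold Spec_GetFilenameAndExtension; infer_instance

-- ===== CLAIM (what is proved, stated in full; the proofs are below) =====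
def Claim_equal_GetFilenameAndExtension : Prop := ∀ (FileName : String), Dom_GetFilenameAndExtension FileName → Spec_GetFilenameAndExtension FileName (GetFilenameAndExtension FileName)

-- ===== LEMMAS AND PROOFS =====

-- A simple structural model of splitting on '.'.
def pvSp : List Char → List (List Char)
  | [] => [[]]
  | c :: rest =>
    if c = '.' then [] :: pvSp rest
    else
      match pvSp rest with
      | [] => [[c]]
      | p :: ps => (c :: p) :: ps

theorem pvSp_ne_nil (s : List Char) : pvSp s ≠ [] := by
  cases s with
  | nil => simp [pvSp]
  | cons c rest =>
    simp only [pvSp]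
    split_ifs
    · simp
    · cases h : pvSp rest <;> simp

theorem pvSplitOn_go_eq (fuel : Nat) (l cur : List Char) (acc : List (List Char))
    (h : l.length < fuel) :
    PySem.Chars.splitOn.go ['.'] fuel l cur acc
      = acc.reverse ++ (pvSp l).modifyHead (cur.reverse ++ ·) := by
  induction fuel generalizing l cur acc with
  | zero => omega
  | succ f ih =>
    cases l with
    | nil =>
      simp [PySem.Chars.splitOn.go, pvSp]
    | cons c rest =>
      by_cases hc : c = '.'
      · subst hc
        have hpre : List.isPrefixOf ['.'] ('.' :: rest) = true := by
          simp [List.isPrefixOf]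
        rw [PySem.Chars.splitOn.go]
        simp only [hpre, if_true]
        have hdrop : List.drop ['.'].length ('.' :: rest) = rest := rfl
        rw [hdrop, ih rest [] (cur.reverse :: acc) (by simp at h ⊢; omega)]
        cases hsp : pvSp rest <;> simp [pvSp, hsp]
      · have hpre : List.isPrefixOf ['.'] (c :: rest) = false := by
          simp [List.isPrefixOf]; intro hh; exact hc hh.symm
        rw [PySem.Chars.splitOn.go]
        simp only [hpre]
        rw [if_neg (by simp)]
        rw [ih rest (c :: cur) acc (by simp at h ⊢; omega)]
        simp only [pvSp, if_neg hc]
        cases hsp : pvSp rest with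
        | nil => exact absurd hsp (pvSp_ne_nil rest)
        | cons p ps => simp

theorem pvSplitOn_eq (s : List Char) : PySem.Chars.splitOn s ['.'] = pvSp s := by
  rw [PySem.Chars.splitOn, pvSplitOn_go_eq (s.length + 1) s [] [] (by omega)]
  cases h : pvSp s with
  | nil => exact absurd h (pvSp_ne_nil s)
  | cons p ps => simp

theorem pvSp_no_dot (s : List Char) (h : '.' ∉ s) : pvSp s = [s] := by
  induction s with
  | nil => rfl
  | cons c rest ih =>
    simp at h
    have hc : ¬ c = '.' := fun hh => h.1 hh.symm
    simp [pvSp, hc, ih h.2]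

theorem pvSp_append (a b : List Char) : pvSp (a ++ '.' :: b) = pvSp a ++ pvSp b := by
  induction a with
  | nil => simp [pvSp]
  | cons c a' ih =>
    by_cases hc : c = '.'
    · subst hc; simp [pvSp, ih]
    · simp only [List.cons_append, pvSp, if_neg hc, ih]
      cases h : pvSp a' with
      | nil => exact absurd h (pvSp_ne_nil a')
      | cons p ps => simp

theorem pvSp_intercalate (s : List Char) : List.intercalate ['.'] (pvSp s) = s := by
  induction s with
  | nil => simp [pvSp, List.intercalate]
  | cons c rest ih =>
    by_cases hc : c = '.'
    · subst hc
      simp only [pvSp, if_pos]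
      cases h : pvSp rest with
      | nil => exact absurd h (pvSp_ne_nil rest)
      | cons p ps =>
        rw [h] at ih
        simp [List.intercalate] at ih ⊢
        simpa using ih
    · simp only [pvSp, if_neg hc]
      cases h : pvSp rest with
      | nil => exact absurd h (pvSp_ne_nil rest)
      | cons p ps =>
        rw [h] at ih
        simp [List.intercalate] at ih ⊢
        cases ps with
        | nil => simpa using ih
        | cons q qs => simpa using ih

-- the last-dot decomposition of a string containing a dot
theorem pvLastDot (s : List Char) (h : '.' ∈ s) :
    ∃ a b, s = a ++ '.' :: b ∧ '.' ∉ b := by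
  induction s using List.reverseRecOn with
  | nil => simp at h
  | append_singleton xs x ih =>
    by_cases hx : x = '.'
    · exact ⟨xs, [], by simp [hx], by simp⟩
    · have hxs : '.' ∈ xs := by
        simp only [List.mem_append, List.mem_singleton] at h
        rcases h with h1 | h2
        · exact h1
        · exact absurd h2.symm hx
      obtain ⟨a, b, rfl, hb⟩ := ih hxs
      refine ⟨a, b ++ [x], by simp, ?_⟩
      simp only [List.mem_append, List.mem_singleton]
      rintro (h1 | h2)
      · exact hb h1
      · exact hx h2.symm

-- ['.'] is a prefix of s.drop j iff position j holds a dot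
theorem pvPrefixDot (s : List Char) (j : Nat) :
    List.isPrefixOf ['.'] (s.drop j) = true ↔ s[j]? = some '.' := by
  have h0 : (s.drop j)[0]? = s[j]? := by
    rw [List.getElem?_drop]
    norm_num
  rcases hdrop : s.drop j with _ | ⟨c, r⟩ <;> rw [hdrop] at h0
  · simp [List.isPrefixOf, ← h0]
  · simp only [List.getElem?_cons_zero] at h0
    rw [← h0]
    constructor
    · intro hp
      simp [List.isPrefixOf] at hp
      exact congrArg some hp.symm
    · intro hs
      simp only [Option.some.injEq] at hs
      simp [List.isPrefixOf, hs]

-- rfind.go for a single character: miss / hit characterizations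
theorem pvRfindGo_miss (s : List Char) (n : Nat)
    (h : ∀ j, j ≤ n → s[j]? ≠ some '.') :
    PySem.Chars.rfind.go s ['.'] n = -1 := by
  induction n with
  | zero =>
    rw [PySem.Chars.rfind.go]
    rw [if_neg]
    intro hp
    exact h 0 (le_refl 0) ((pvPrefixDot s 0).mp (by simpa using hp))

  | succ m ih =>
    rw [PySem.Chars.rfind.go]
    rw [if_neg]
    · exact ih (fun j hj => h j (by omega))
    · intro hp
      exact h (m + 1) (le_refl _) ((pvPrefixDot s (m + 1)).mp hp)

theorem pvRfindGo_hit (s : List Char) (n k : Nat) (hk : k ≤ n)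
    (hhit : s[k]? = some '.')
    (habove : ∀ j, k < j → j ≤ n → s[j]? ≠ some '.') :
    PySem.Chars.rfind.go s ['.'] n = (k : Int) := by
  induction n with
  | zero =>
    have hk0 : k = 0 := by omega
    subst hk0
    rw [PySem.Chars.rfind.go]
    have hpre := (pvPrefixDot s 0).mpr (by simpa using hhit)
    rw [List.drop_zero] at hpre
    rw [if_pos hpre]
    simp
  | succ m ih =>
    rw [PySem.Chars.rfind.go]
    by_cases hke : k = m + 1
    · subst hke
      rw [if_pos ((pvPrefixDot s (m + 1)).mpr hhit)]
    · have hkm : k ≤ m := by omega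
      rw [if_neg]
      · exact ih hkm (fun j hj1 hj2 => habove j hj1 (by omega))
      · intro hp
        exact habove (m + 1) (by omega) (le_refl _) ((pvPrefixDot s (m + 1)).mp hp)

theorem pvRfind_no_dot (s : List Char) (h : '.' ∉ s) :
    PySem.Chars.rfind s ['.'] = -1 := by
  rw [PySem.Chars.rfind]
  exact pvRfindGo_miss s s.length
    (fun j _ hget => h (List.mem_of_getElem? hget))

theorem pvRfind_last_dot (a b : List Char) (hb : '.' ∉ b) :
    PySem.Chars.rfind (a ++ '.' :: b) ['.'] = (a.length : Int) := by
  rw [PySem.Chars.rfind]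
  apply pvRfindGo_hit
  · simp
  · rw [List.getElem?_append_right (le_refl _)]
    simp
  · intro j hj1 hj2 hget
    rw [List.getElem?_append_right (by omega)] at hget
    rcases hcase : j - a.length with _ | m
    · omega
    · rw [hcase] at hget
      simp only [List.getElem?_cons_succ] at hget
      exact hb (List.mem_of_getElem? hget)

-- A's loop over range(NParts-1) joins the first NParts-1 parts with '.'
theorem pvLoop_eq_intercalate (parts : List (List Char)) (m : Nat)
    (hm : m + 1 = parts.length) (k : Nat) (hk : k ≤ m) (acc : List Char) :
    (PySem.List.pyRange (k : Int) (m : Int) 1).foldl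
      (fun acc i =>
        if i < (parts.length : Int) - 2 then
          acc ++ (PySem.List.pyGet? parts i).getD [] ++ ['.']
        else
          acc ++ (PySem.List.pyGet? parts i).getD []) acc
      = acc ++ List.intercalate ['.'] ((parts.take m).drop k) := by
  induction hd : m - k generalizing k acc with
  | zero =>
    have hkm : k = m := by omega
    subst hkm
    rw [PySem.List.pyRange_one_eq_nil (by omega)]
    simp [List.drop_eq_nil_of_le, List.intercalate]
  | succ d ih =>
    have hkm : k < m := by omega
    have hklen : k < parts.length := by omega
    rw [PySem.List.pyRange_one_cons (by exact_mod_cast hkm)]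
    simp only [List.foldl_cons]
    have hget : (PySem.List.pyGet? parts (k : Int)).getD [] = parts[k] := by
      rw [PySem.List.pyGet?_natCast, List.getElem?_eq_getElem hklen]
      rfl
    have hdrop : (parts.take m).drop k = parts[k] :: (parts.take m).drop (k + 1) := by
      rw [List.drop_eq_getElem_cons (by simp; omega)]
      congr 1
      exact List.getElem_take
    have hcast : ((k : Int) + 1) = ((k + 1 : Nat) : Int) := by push_cast; ring
    by_cases hlast : k + 1 = m
    · have hif : ¬ ((k : Int) < (parts.length : Int) - 2) := by omega
      rw [if_neg hif, hcast, ih (k + 1) (by omega) _ (by omega)]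
      have hnil : (parts.take m).drop (k + 1) = [] := by
        apply List.drop_eq_nil_of_le; simp; omega
      rw [hdrop, hnil]
      simp [List.intercalate]
      try rw [List.getElem?_eq_getElem hklen]
      try rfl
    · have hif : ((k : Int) < (parts.length : Int) - 2) := by omega
      rw [if_pos hif, hcast, ih (k + 1) (by omega) _ (by omega)]
      rw [hdrop]
      rcases hcase : (parts.take m).drop (k + 1) with _ | ⟨q, qs⟩
      · exfalso
        have := congrArg List.length hcase
        simp at this
        omega
      · simp [List.intercalate]
        try rw [List.getElem?_eq_getElem hklen]
        try rfl

-- evaluate port A at the split decomposition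
theorem pvA_eval (s : List Char) :
    GetFilenameAndExtension (String.ofList s)
      = (String.ofList (List.intercalate ['.'] (pvSp s).dropLast),
         String.ofList ((pvSp s).getLast (pvSp_ne_nil s))) := by
  unfold GetFilenameAndExtension
  simp only [String.toList_ofList, pvSplitOn_eq]
  have hne : pvSp s ≠ [] := pvSp_ne_nil s
  have hlen : 0 < (pvSp s).length := List.length_pos_iff.mpr hne
  have hm : ((pvSp s).length - 1) + 1 = (pvSp s).length := by omega
  have hcast : ((pvSp s).length : Int) - 1 = (((pvSp s).length - 1 : Nat) : Int) := by omega
  refine congrArg₂ Prod.mk ?_ ?_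
  · apply congrArg
    rw [hcast, show (0 : Int) = ((0 : Nat) : Int) from rfl,
      pvLoop_eq_intercalate (pvSp s) ((pvSp s).length - 1) hm 0 (Nat.zero_le _) []]
    rw [List.dropLast_eq_take]
    simp
  · apply congrArg
    rw [hcast, PySem.List.pyGet?_natCast, List.getLast_eq_getElem,
      List.getElem?_eq_getElem (by omega)]
    rfl

-- ===== VERDICT (by name: the statement is the Claim_ definition above) =====
theorem GetFilenameAndExtension_spec : Claim_equal_GetFilenameAndExtension := by
  unfold Claim_equal_GetFilenameAndExtension Spec_GetFilenameAndExtension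
  intro F _
  obtain ⟨s, rfl⟩ : ∃ s, F = String.ofList s := ⟨F.toList, by simp⟩
  by_cases hdot : '.' ∈ s
  · obtain ⟨a, b, rfl, hb⟩ := pvLastDot s hdot
    rw [pvA_eval]
    have hr : PySem.Str.rfind (String.ofList (a ++ '.' :: b)) "." = (a.length : Int) := by
      rw [PySem.Str.rfind]
      rw [show ("." : String).toList = ['.'] from rfl, String.toList_ofList]
      exact pvRfind_last_dot a b hb
    unfold GetFilenameAndExtension_alt
    rw [hr, if_neg (show ¬((a.length : Int) = -1) by omega)]
    have hsp : pvSp (a ++ '.' :: b) = pvSp a ++ [b] := by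
      rw [pvSp_append, pvSp_no_dot b hb]
    refine congrArg₂ Prod.mk ?_ ?_
    · have ht : (PySem.Str.slice (String.ofList (a ++ '.' :: b)) none (some (a.length : Int))).toList = a := by
        rw [PySem.Str.toList_slice, String.toList_ofList, PySem.Chars.slice_eq_listSlice,
          PySem.List.slice_to _ (by omega)]
        simp
      have hslc : PySem.Str.slice (String.ofList (a ++ '.' :: b)) none (some (a.length : Int)) = String.ofList a := by
        have h2 := congrArg String.ofList ht
        rw [String.ofList_toList] at h2
        exact h2
      rw [hslc]
      apply congrArg
      rw [hsp]
      have hdl : (pvSp a ++ [b]).dropLast = pvSp a := by simp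
      rw [hdl, pvSp_intercalate]
    · have hd : (PySem.Str.slice (String.ofList (a ++ '.' :: b)) (some ((a.length : Int) + 1)) none).toList = b := by
        rw [PySem.Str.toList_slice, String.toList_ofList, PySem.Chars.slice_eq_listSlice,
          PySem.List.slice_from _ (by omega)]
        rw [show ((a.length : Int) + 1).toNat = (a ++ ['.']).length by simp]
        rw [show a ++ '.' :: b = (a ++ ['.']) ++ b by simp]
        exact List.drop_left
      have hslc : PySem.Str.slice (String.ofList (a ++ '.' :: b)) (some ((a.length : Int) + 1)) none = String.ofList b := by
        have h2 := congrArg String.ofList hd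
        rw [String.ofList_toList] at h2
        exact h2
      rw [hslc]
      apply congrArg
      simp only [hsp]
      simp
  · rw [pvA_eval]
    have hr : PySem.Str.rfind (String.ofList s) "." = -1 := by
      rw [PySem.Str.rfind]
      rw [show ("." : String).toList = ['.'] from rfl, String.toList_ofList]
      exact pvRfind_no_dot s hdot
    unfold GetFilenameAndExtension_alt
    rw [hr, if_pos rfl]
    simp only [pvSp_no_dot s hdot]
    refine congrArg₂ Prod.mk ?_ ?_
    · simp [List.intercalate]
    · simp
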